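-- pv_equiv track=rewrite | github.com/etnes/MUMer | SAIS.py | guessLMSSort
-- ===== SOURCE A (Python) =====
-- S_TYPE = ord('S')
--
-- L_TYPE = ord('L')
--
-- def isLMSChar(offset, typemap):
--     """
--     Retruns true if the character at the given offset is
--     left-most S-type character.
--     """
--
--     #first character can't be LMS char
--     if offset <= 0:
--         return False
--     if typemap[offset] == S_TYPE and typemap[offset - 1] == L_TYPE:
--         return True
--
--     return False
--
-- def findBucketTails(bucketSizes):
--     offset = 0
--     res = []
--     for size in bucketSizes:
--         offset += size
--         res.append(offset - 1)
--
--     return res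
--
-- def guessLMSSort(string, bucketSizes, typemap):
--     """
--     Make a suffix array with LMS-substrings approximately right.
--     """
--
--     guessedSuffixArray = [-1] * len(string)
--
--     bucketTails = findBucketTails(bucketSizes)
--
--     # bucket sort all the LMS suffices into their bucket
--     for i in range(len(string)):
--         # not start of the LMS suffix
--         if not isLMSChar(i, typemap):
--             continue
--
--         bucketIndex = string[i]
--         guessedSuffixArray[bucketTails[bucketIndex]] = i
--         bucketTails[bucketIndex] -= 1
--
--     return guessedSuffixArray
-- ===== SOURCE B (Python) =====
-- S_TYPE = ord('S')
--
-- L_TYPE = ord('L')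
--
-- def guessLMSSort(string, bucketSizes, typemap):
--     """
--     Make a suffix array with LMS-substrings approximately right.
--     Two-phase version: gather the LMS positions per character first,
--     then fill each bucket segment in one go.
--     """
--     n = len(string)
--
--     # phase 1: collect the LMS positions, grouped by their character,
--     # in increasing index order
--     groups = {}
--     for i in range(1, n):
--         if typemap[i] == S_TYPE and typemap[i - 1] == L_TYPE:
--             groups.setdefault(string[i], []).append(i)
--
--     # phase 2: walk the buckets once, keeping a running bucket tail,
--     # and write each group backwards from its bucket tail
--     guessedSuffixArray = [-1] * n
--     tail = -1
--     for c, size in enumerate(bucketSizes):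
--         tail += size
--         for k, i in enumerate(groups.get(c, [])):
--             guessedSuffixArray[tail - k] = i
--
--     return guessedSuffixArray
-- ===== Notes on version B (the rewrite author's own statement) =====
-- stated objective: alternative
-- what changed: A interleaves one scan over the string that scatters each LMS index into its bucket while mutating a tails array; B first gathers the LMS positions grouped by character into a dict, then fills each bucket segment backwards from its tail in a separate pass over the buckets.
-- outside the precondition, e.g. on guessLMSSort([1, -1, 1], [2, 1], [76, 83, 76]): A returns [-1, -1, 1], B returns [-1, -1, -1]; on guessLMSSort([0, 0], [0, 2], [76, 83]): A returns [-1, 1], B returns [-1, 1]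
import Mathlib
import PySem

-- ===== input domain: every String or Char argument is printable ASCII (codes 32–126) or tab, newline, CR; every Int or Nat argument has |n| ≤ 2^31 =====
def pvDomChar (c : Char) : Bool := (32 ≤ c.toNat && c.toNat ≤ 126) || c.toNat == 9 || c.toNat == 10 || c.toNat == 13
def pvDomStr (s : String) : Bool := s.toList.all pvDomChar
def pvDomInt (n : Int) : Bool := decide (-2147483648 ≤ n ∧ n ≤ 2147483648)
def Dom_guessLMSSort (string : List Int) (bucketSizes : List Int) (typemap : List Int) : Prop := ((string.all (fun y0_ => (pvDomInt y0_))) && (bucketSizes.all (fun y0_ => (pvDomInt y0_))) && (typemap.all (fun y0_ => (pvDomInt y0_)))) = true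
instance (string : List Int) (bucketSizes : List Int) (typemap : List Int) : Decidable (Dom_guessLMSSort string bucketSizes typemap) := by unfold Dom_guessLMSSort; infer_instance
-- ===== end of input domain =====

-- B re-decomposes A's interleaved LMS bucket scatter into two passes (gather LMS positions
-- per character into a dict, then fill each bucket segment from its tail); return values agree
-- on Pre_ (no argument is mutated by either version's Lean port; the Python B builds its own list).

-- ===== PORT A =====
-- (indexing is ported with PySem.List.pyGetD/pySetD; Pre_guessLMSSort keeps every index in range,
--  exactly where the Python returns without an IndexError or a negative-index wraparound)
def S_TYPE : Int := 83

def L_TYPE : Int := 76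

def isLMSChar (offset : Int) (typemap : List Int) : Bool :=
  if offset ≤ 0 then false
  else if PySem.List.pyGetD typemap offset 0 == S_TYPE && PySem.List.pyGetD typemap (offset - 1) 0 == L_TYPE then true
  else false

def findBucketTails (bucketSizes : List Int) : List Int :=
  (bucketSizes.foldl (fun (st : Int × List Int) size =>
    (st.1 + size, st.2 ++ [st.1 + size - 1])) ((0 : Int), ([] : List Int))).2

def guessLMSSort (string : List Int) (bucketSizes : List Int) (typemap : List Int) : List Int :=
  let guessedSuffixArray := List.replicate string.length (-1 : Int)
  let bucketTails := findBucketTails bucketSizes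
  let st := (PySem.List.pyRange 0 (string.length : Int) 1).foldl
    (fun (st : List Int × List Int) i =>
      if !(isLMSChar i typemap) then st
      else
        let bucketIndex := PySem.List.pyGetD string i 0
        let t := PySem.List.pyGetD st.2 bucketIndex 0
        (PySem.List.pySetD st.1 t i, PySem.List.pySetD st.2 bucketIndex (t - 1)))
    (guessedSuffixArray, bucketTails)
  st.1

-- ===== PORT B =====
def guessLMSSort_alt (string : List Int) (bucketSizes : List Int) (typemap : List Int) : List Int :=
  let n := string.length
  -- phase 1: gather the LMS positions per character, in increasing index order
  let groups : PySem.Dict Int (List Int) :=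
    (PySem.List.pyRange 1 (n : Int) 1).foldl
      (fun g i =>
        if PySem.List.pyGetD typemap i 0 == S_TYPE && PySem.List.pyGetD typemap (i - 1) 0 == L_TYPE then
          g.insert (PySem.List.pyGetD string i 0)
            ((g.getD (PySem.List.pyGetD string i 0) []) ++ [i])
        else g)
      PySem.Dict.empty
  -- phase 2: walk the buckets once with a running tail, writing each group backwards from it
  let st := (PySem.List.enumerate bucketSizes 0).foldl
    (fun (st : List Int × Int) cs =>
      let tail := st.2 + cs.2
      let res := (PySem.List.enumerate (groups.getD cs.1 []) 0).foldl
        (fun res ki => PySem.List.pySetD res (tail - ki.1) ki.2) st.1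
      (res, tail))
    (List.replicate n (-1 : Int), (-1 : Int))
  st.1

-- ===== PRECONDITION & SPEC =====
-- closed-form descriptions of the input used by Pre_ (no port is referenced):
-- the LMS positions of the input, their per-character counts, and the bucket tail offsets
def pvLMS (string : List Int) (typemap : List Int) : List Int :=
  (PySem.List.pyRange 1 (string.length : Int) 1).filter
    (fun i => PySem.List.pyGetD typemap i 0 == 83 && PySem.List.pyGetD typemap (i - 1) 0 == 76)

def pvCnt (string : List Int) (typemap : List Int) (c : Int) : Nat :=
  (pvLMS string typemap).countP (fun i => PySem.List.pyGetD string i 0 == c)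

def pvTail (bucketSizes : List Int) (c : Nat) : Int := (bucketSizes.take (c + 1)).sum - 1

-- Pre_ restricts to the natural SA-IS domain: the type map covers the string and, unless the
-- string has no LMS position at all (then no bucket is touched), bucket sizes are nonnegative,
-- every LMS character is a valid bucket index, no bucket receives more LMS suffixes than its
-- size, and every used bucket tail lies inside the array — outside it A raises an IndexError or
-- silently scatters through Python's negative-index wraparound / overflowing buckets, a write
-- order accident no caller would specify.
def Pre_guessLMSSort (string : List Int) (bucketSizes : List Int) (typemap : List Int) : Prop :=
  (string.length ≤ 1 ∨ string.length ≤ typemap.length) ∧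
  (pvLMS string typemap = [] ∨
    ((∀ b ∈ bucketSizes, 0 ≤ b) ∧
     (∀ i ∈ pvLMS string typemap,
        0 ≤ PySem.List.pyGetD string i 0 ∧ PySem.List.pyGetD string i 0 < (bucketSizes.length : Int)) ∧
     (∀ c : Nat, c ∈ List.range bucketSizes.length →
        (pvCnt string typemap (c : Int) : Int) ≤ bucketSizes.getD c 0 ∧
        (0 < pvCnt string typemap c → pvTail bucketSizes c < (string.length : Int)))))

instance (string : List Int) (bucketSizes : List Int) (typemap : List Int) : Decidable (Pre_guessLMSSort string bucketSizes typemap) := by unfold Pre_guessLMSSort; infer_instance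

def pvWitness_guessLMSSort : List Int × List Int × List Int :=
  ([1, 0, 1, 0, 0], [2, 3], [76, 83, 76, 83, 83])

def Spec_guessLMSSort (string : List Int) (bucketSizes : List Int) (typemap : List Int) (out : List Int) : Prop := out = guessLMSSort_alt string bucketSizes typemap
instance (string : List Int) (bucketSizes : List Int) (typemap : List Int) (out : List Int) : Decidable (Spec_guessLMSSort string bucketSizes typemap out) := by unfold Spec_guessLMSSort; infer_instance

-- ===== CLAIM (what is proved, stated in full; the proofs are below) =====
def Claim_equal_guessLMSSort : Prop := ∀ (string : List Int) (bucketSizes : List Int) (typemap : List Int), Dom_guessLMSSort string bucketSizes typemap → Pre_guessLMSSort string bucketSizes typemap → Spec_guessLMSSort string bucketSizes typemap (guessLMSSort string bucketSizes typemap)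

-- ===== LEMMAS AND PROOFS =====

-- the single write primitive both ports reduce to
def pvOp (a : List Int) (w : Int × Int) : List Int := PySem.List.pySetD a w.1 w.2

-- the LMS positions with character c, in increasing order
def pvGroup (string : List Int) (typemap : List Int) (c : Int) : List Int :=
  (pvLMS string typemap).filter (fun i => PySem.List.pyGetD string i 0 == c)

-- the canonical bucket-by-bucket write list (B's write order)
def pvW (string : List Int) (bucketSizes : List Int) (typemap : List Int) : List (Int × Int) :=
  (List.range bucketSizes.length).flatMap (fun (c : Nat) =>
    (PySem.List.enumerate (pvGroup string typemap (c : Int)) 0).map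
      (fun ki => (pvTail bucketSizes c - ki.1, ki.2)))

-- A's write list: scan the LMS positions in index order, decrementing the current tails
def pvWrites (string : List Int) : List Int → List Int → List (Int × Int)
  | [], _ => []
  | i :: is, ts =>
    let c := PySem.List.pyGetD string i 0
    let t := PySem.List.pyGetD ts c 0
    (t, i) :: pvWrites string is (PySem.List.pySetD ts c (t - 1))

lemma enum_shift {α : Type} (l : List α) (s : Int) :
    PySem.List.enumerate l (s + 1) = (PySem.List.enumerate l s).map (fun p => (p.1 + 1, p.2)) := by
  induction l generalizing s with
  | nil => rfl
  | cons x xs ih => simp [PySem.List.enumerate_cons, ih (s + 1)]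

lemma mem_enum' {α : Type} {l : List α} {p : Int × α} {s : Int}
    (h : p ∈ PySem.List.enumerate l s) : s ≤ p.1 ∧ p.1 < s + (l.length : Int) := by
  induction l generalizing s with
  | nil => simp [PySem.List.enumerate] at h
  | cons x xs ih =>
    rw [PySem.List.enumerate_cons] at h
    rcases List.mem_cons.mp h with h | h
    · subst h; simp only [List.length_cons]; push_cast; omega
    · have := ih h; simp only [List.length_cons]; push_cast; omega

lemma mem_enum {α : Type} {l : List α} {p : Int × α} (h : p ∈ PySem.List.enumerate l 0) :
    0 ≤ p.1 ∧ p.1 < (l.length : Int) := by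
  have := mem_enum' h; omega

lemma pairwise_enum_fst_lt {α : Type} (l : List α) (s : Int) :
    (PySem.List.enumerate l s).Pairwise (fun a b => a.1 < b.1) := by
  induction l generalizing s with
  | nil => exact List.Pairwise.nil
  | cons x xs ih =>
    rw [PySem.List.enumerate_cons]
    refine List.Pairwise.cons ?_ (ih (s + 1))
    intro b hb
    have := mem_enum' hb; omega

lemma getD_setD (xs : List Int) (i j : Int) (v d : Int)
    (hi : 0 ≤ i) (hilen : i < (xs.length : Int)) (hj : 0 ≤ j) :
    PySem.List.pyGetD (PySem.List.pySetD xs i v) j d =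
      if j = i then v else PySem.List.pyGetD xs j d := by
  by_cases hji : j = i
  · subst hji
    rw [PySem.List.pySetD_of_nonneg _ _ hi, if_pos rfl]
    have hj2 : j = ((j.toNat : Nat) : Int) := by omega
    rw [hj2, PySem.List.pyGetD_natCast]
    have hlt : j.toNat < xs.length := by omega
    have hm : max j 0 = j := by omega
    simp [List.getD, hm, hlt]
  · rw [if_neg hji, PySem.List.pySetD_of_nonneg _ _ hi]
    have hj2 : j = ((j.toNat : Nat) : Int) := by omega
    rw [hj2, PySem.List.pyGetD_natCast, PySem.List.pyGetD_natCast]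
    have hne : i.toNat ≠ j.toNat := by omega
    simp [List.getD, hne]

lemma fbt_aux (bs : List Int) : ∀ (off : Int) (acc : List Int),
    (bs.foldl (fun (st : Int × List Int) size => (st.1 + size, st.2 ++ [st.1 + size - 1])) (off, acc)).2
      = acc ++ (List.range bs.length).map (fun c => off + (bs.take (c + 1)).sum - 1) := by
  induction bs with
  | nil => intro off acc; simp
  | cons size bs ih =>
    intro off acc
    rw [List.foldl_cons, ih (off + size) (acc ++ [off + size - 1])]
    simp only [List.length_cons]
    rw [List.range_succ_eq_map, List.map_cons, List.map_map, List.append_assoc]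
    congr 2
    rw [List.singleton_append]
    congr 1
    · simp
    · refine List.map_congr_left (fun c _ => ?_)
      simp only [Function.comp_apply, List.take_succ_cons, List.sum_cons]
      ring

lemma fbt_eq (bucketSizes : List Int) :
    findBucketTails bucketSizes =
      (List.range bucketSizes.length).map (fun c => pvTail bucketSizes c) := by
  unfold findBucketTails pvTail
  rw [fbt_aux bucketSizes 0 []]
  simp

lemma getD_fbt (bucketSizes : List Int) (c : Nat) (hc : c < bucketSizes.length) :
    PySem.List.pyGetD (findBucketTails bucketSizes) (c : Int) 0 = pvTail bucketSizes c := by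
  rw [fbt_eq, PySem.List.pyGetD_natCast]
  simp [List.getD, hc]


lemma foldl_skip {σ : Type} (p : Int → Bool) (f : σ → Int → σ) (l : List Int) (init : σ) :
    l.foldl (fun st i => if !(p i) then st else f st i) init = (l.filter p).foldl f init := by
  rw [List.foldl_filter]
  congr 1
  funext st i
  by_cases h : p i <;> simp [h]

lemma AfoldPair (string : List Int) (lms : List Int) (gsa ts : List Int) :
    (lms.foldl (fun (st : List Int × List Int) i =>
        let bucketIndex := PySem.List.pyGetD string i 0
        let t := PySem.List.pyGetD st.2 bucketIndex 0
        (PySem.List.pySetD st.1 t i, PySem.List.pySetD st.2 bucketIndex (t - 1))) (gsa, ts)).1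
      = (pvWrites string lms ts).foldl pvOp gsa := by
  induction lms generalizing gsa ts with
  | nil => rfl
  | cons i is ih =>
    simp only [List.foldl_cons, pvWrites]
    rw [ih]
    rfl

lemma filter_pyRange_isLMS (string typemap : List Int) :
    (PySem.List.pyRange 0 (string.length : Int) 1).filter (fun i => isLMSChar i typemap)
      = pvLMS string typemap := by
  unfold pvLMS
  by_cases hn : 0 < string.length
  · rw [PySem.List.pyRange_one_cons (by exact_mod_cast hn)]
    rw [List.filter_cons]
    have h0 : isLMSChar 0 typemap = false := by simp [isLMSChar]
    rw [h0]
    simp only [Bool.false_eq_true, if_false, zero_add]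
    refine List.filter_congr (fun i hi => ?_)
    have h1 : (1 : Int) ≤ i := ((PySem.List.mem_pyRange_one).mp hi).1
    simp only [isLMSChar, S_TYPE, L_TYPE]
    rw [if_neg (by omega)]
    by_cases ht : (PySem.List.pyGetD typemap i 0 == 83 && PySem.List.pyGetD typemap (i - 1) 0 == 76) = true
    · simp [ht]
    · simp [ht]
  · have h0 : string.length = 0 := by omega
    rw [h0]
    simp [PySem.List.pyRange_one_eq_nil]

lemma A_eq_writes (string bucketSizes typemap : List Int) :
    guessLMSSort string bucketSizes typemap
      = (pvWrites string (pvLMS string typemap) (findBucketTails bucketSizes)).foldl pvOp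
          (List.replicate string.length (-1 : Int)) := by
  have step := foldl_skip (fun i => isLMSChar i typemap)
    (fun (st : List Int × List Int) i =>
      let bucketIndex := PySem.List.pyGetD string i 0
      let t := PySem.List.pyGetD st.2 bucketIndex 0
      (PySem.List.pySetD st.1 t i, PySem.List.pySetD st.2 bucketIndex (t - 1)))
    (PySem.List.pyRange 0 (string.length : Int) 1)
    (List.replicate string.length (-1 : Int), findBucketTails bucketSizes)
  have h1 : guessLMSSort string bucketSizes typemap
      = (((PySem.List.pyRange 0 (string.length : Int) 1).filter (fun i => isLMSChar i typemap)).foldl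
          (fun (st : List Int × List Int) i =>
            let bucketIndex := PySem.List.pyGetD string i 0
            let t := PySem.List.pyGetD st.2 bucketIndex 0
            (PySem.List.pySetD st.1 t i, PySem.List.pySetD st.2 bucketIndex (t - 1)))
          (List.replicate string.length (-1 : Int), findBucketTails bucketSizes)).1 :=
    congrArg Prod.fst step
  rw [h1, filter_pyRange_isLMS]
  exact AfoldPair string (pvLMS string typemap) _ _

lemma dict_getD_fold (string typemap : List Int) (l : List Int)
    (g : PySem.Dict Int (List Int)) (c : Int) :
    ((l.foldl (fun (g : PySem.Dict Int (List Int)) i =>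
        if PySem.List.pyGetD typemap i 0 == S_TYPE && PySem.List.pyGetD typemap (i - 1) 0 == L_TYPE then
          g.insert (PySem.List.pyGetD string i 0)
            ((g.getD (PySem.List.pyGetD string i 0) []) ++ [i])
        else g) g).getD c [])
      = g.getD c [] ++
        (l.filter (fun i => PySem.List.pyGetD typemap i 0 == S_TYPE && PySem.List.pyGetD typemap (i - 1) 0 == L_TYPE)).filter
          (fun i => PySem.List.pyGetD string i 0 == c) := by
  induction l generalizing g with
  | nil => simp
  | cons i l ih =>
    simp only [List.foldl_cons, List.filter_cons]
    by_cases ht : (PySem.List.pyGetD typemap i 0 == S_TYPE && PySem.List.pyGetD typemap (i - 1) 0 == L_TYPE) = true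
    · rw [if_pos ht, ih, if_pos ht, List.filter_cons]
      rw [PySem.Dict.getD_insert]
      by_cases hc : c = PySem.List.pyGetD string i 0
      · rw [if_pos hc]
        simp [hc, List.append_assoc]
      · rw [if_neg hc]
        have hne : (PySem.List.pyGetD string i 0 == c) = false :=
          beq_eq_false_iff_ne.mpr (fun h => hc h.symm)
        simp [hne]
    · rw [if_neg ht, ih, if_neg ht]

def pvWL (G : Int → List Int) : List Int → Int → Int → List (Int × Int)
  | [], _, _ => []
  | size :: bs, s, t =>
    (PySem.List.enumerate (G s) 0).map (fun ki => (t + size - ki.1, ki.2)) ++ pvWL G bs (s + 1) (t + size)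

lemma fill_eq (G : Int → List Int) (bs : List Int) : ∀ (s t : Int) (acc : List Int),
    ((PySem.List.enumerate bs s).foldl (fun (st : List Int × Int) cs =>
        let tail := st.2 + cs.2
        let res := (PySem.List.enumerate (G cs.1) 0).foldl
          (fun res ki => PySem.List.pySetD res (tail - ki.1) ki.2) st.1
        (res, tail)) (acc, t)).1
      = (pvWL G bs s t).foldl pvOp acc := by
  induction bs with
  | nil => intro s t acc; rfl
  | cons size bs ih =>
    intro s t acc
    rw [PySem.List.enumerate_cons, List.foldl_cons]
    simp only [pvWL, List.foldl_append]
    rw [ih, List.foldl_map]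
    rfl

lemma wl_closed (G : Int → List Int) (bs : List Int) : ∀ (s t : Int),
    pvWL G bs s t = (List.range bs.length).flatMap (fun (k : Nat) =>
      (PySem.List.enumerate (G (s + k)) 0).map
        (fun ki => (t + (bs.take (k + 1)).sum - ki.1, ki.2))) := by
  induction bs with
  | nil => intro s t; simp [pvWL]
  | cons size bs ih =>
    intro s t
    simp only [pvWL, List.length_cons]
    rw [List.range_succ_eq_map, List.flatMap_cons, List.flatMap_map]
    congr 1
    · norm_num
    · rw [ih (s + 1) (t + size)]
      congr 1
      funext k
      have hc : s + 1 + (k : Int) = s + ((k + 1 : Nat) : Int) := by push_cast; ring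
      rw [hc]
      congr 1
      funext ki
      simp only [List.take_succ_cons, List.sum_cons, Nat.succ_eq_add_one]
      rw [Prod.mk.injEq]
      exact ⟨by ring, rfl⟩

lemma B_eq_W (string bucketSizes typemap : List Int) :
    guessLMSSort_alt string bucketSizes typemap
      = (pvW string bucketSizes typemap).foldl pvOp (List.replicate string.length (-1 : Int)) := by
  have h1 : guessLMSSort_alt string bucketSizes typemap
      = (pvWL (fun c =>
          (((PySem.List.pyRange 1 (string.length : Int) 1).foldl
            (fun (g : PySem.Dict Int (List Int)) i =>
              if PySem.List.pyGetD typemap i 0 == S_TYPE && PySem.List.pyGetD typemap (i - 1) 0 == L_TYPE then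
                g.insert (PySem.List.pyGetD string i 0)
                  ((g.getD (PySem.List.pyGetD string i 0) []) ++ [i])
              else g) PySem.Dict.empty).getD c []))
          bucketSizes 0 (-1)).foldl pvOp (List.replicate string.length (-1 : Int)) :=
    fill_eq (fun c =>
          (((PySem.List.pyRange 1 (string.length : Int) 1).foldl
            (fun (g : PySem.Dict Int (List Int)) i =>
              if PySem.List.pyGetD typemap i 0 == S_TYPE && PySem.List.pyGetD typemap (i - 1) 0 == L_TYPE then
                g.insert (PySem.List.pyGetD string i 0)
                  ((g.getD (PySem.List.pyGetD string i 0) []) ++ [i])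
              else g) PySem.Dict.empty).getD c []))
      bucketSizes 0 (-1) (List.replicate string.length (-1 : Int))
  rw [h1, wl_closed]
  congr 1
  rw [pvW, List.flatMap_def, List.flatMap_def]
  refine congrArg List.flatten (List.map_congr_left (fun k hk => ?_))
  have hg : (((PySem.List.pyRange 1 (string.length : Int) 1).foldl
      (fun (g : PySem.Dict Int (List Int)) i =>
        if PySem.List.pyGetD typemap i 0 == S_TYPE && PySem.List.pyGetD typemap (i - 1) 0 == L_TYPE then
          g.insert (PySem.List.pyGetD string i 0)
            ((g.getD (PySem.List.pyGetD string i 0) []) ++ [i])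
        else g) PySem.Dict.empty).getD ((0 : Int) + (k : Int)) [])
      = pvGroup string typemap (k : Int) := by
    rw [dict_getD_fold]
    show [] ++ _ = _
    rw [List.nil_append, pvGroup, pvLMS]
    norm_num [S_TYPE, L_TYPE]
  rw [hg]
  refine List.map_congr_left (fun ki _ => ?_)
  rw [Prod.mk.injEq]
  refine ⟨by rw [pvTail]; ring, rfl⟩

lemma sum_take_succ (bs : List Int) (c : Nat) (hc : c < bs.length) :
    (bs.take (c + 1)).sum = (bs.take c).sum + bs.getD c 0 := by
  rw [List.take_add_one, List.sum_append]
  simp [List.getElem?_eq_getElem hc, List.getD]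

lemma writes_perm (string : List Int) : ∀ (lms ts : List Int) (m : Nat),
    m ≤ ts.length →
    (∀ i ∈ lms, 0 ≤ PySem.List.pyGetD string i 0 ∧ PySem.List.pyGetD string i 0 < (m : Int)) →
    (pvWrites string lms ts).Perm
      ((List.range m).flatMap (fun (c : Nat) =>
        (PySem.List.enumerate (lms.filter (fun i => PySem.List.pyGetD string i 0 == (c : Int))) 0).map
          (fun ki => (PySem.List.pyGetD ts (c : Int) 0 - ki.1, ki.2)))) := by
  intro lms
  induction lms with
  | nil =>
    intro ts m hm hb
    simp [pvWrites]
  | cons i is ih =>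
    intro ts m hm hb
    obtain ⟨hc0, hcm⟩ := hb i (List.mem_cons_self)
    have hb' : ∀ j ∈ is, 0 ≤ PySem.List.pyGetD string j 0 ∧ PySem.List.pyGetD string j 0 < (m : Int) :=
      fun j hj => hb j (List.mem_cons_of_mem _ hj)
    simp only [pvWrites]
    set c0 : Int := PySem.List.pyGetD string i 0 with hc0def
    set t0 : Int := PySem.List.pyGetD ts c0 0 with ht0def
    set ts' : List Int := PySem.List.pySetD ts c0 (t0 - 1) with hts'def
    set c0n : Nat := c0.toNat with hc0ndef
    have hc0cast : (c0n : Int) = c0 := by omega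
    have hc0n_lt : c0n < m := by omega
    have hlen' : m ≤ ts'.length := by rw [hts'def, PySem.List.length_pySetD]; exact hm
    have IH := ih ts' m hlen' hb'
    have hts'get : ∀ c : Nat, c < m →
        PySem.List.pyGetD ts' (c : Int) 0 =
          if (c : Int) = c0 then t0 - 1 else PySem.List.pyGetD ts (c : Int) 0 := by
      intro c hc
      rw [hts'def]
      exact getD_setD ts c0 (c : Int) (t0 - 1) 0 hc0 (by omega) (by omega)
    have hfilter_ne : ∀ c : Nat, c ≠ c0n →
        ((i :: is).filter (fun j => PySem.List.pyGetD string j 0 == (c : Int)))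
          = is.filter (fun j => PySem.List.pyGetD string j 0 == (c : Int)) := by
      intro c hne
      rw [List.filter_cons]
      have hf : (PySem.List.pyGetD string i 0 == (c : Int)) = false := by
        rw [beq_eq_false_iff_ne]
        omega
      simp [hf]
    have hbucket_ne : ∀ c : Nat, c < m → c ≠ c0n →
        (PySem.List.enumerate ((i :: is).filter (fun j => PySem.List.pyGetD string j 0 == (c : Int))) 0).map
            (fun ki => (PySem.List.pyGetD ts (c : Int) 0 - ki.1, ki.2))
          = (PySem.List.enumerate (is.filter (fun j => PySem.List.pyGetD string j 0 == (c : Int))) 0).map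
            (fun ki => (PySem.List.pyGetD ts' (c : Int) 0 - ki.1, ki.2)) := by
      intro c hc hne
      rw [hfilter_ne c hne, hts'get c hc, if_neg (by omega)]
    have hbucket_eq :
        (PySem.List.enumerate ((i :: is).filter (fun j => PySem.List.pyGetD string j 0 == (c0n : Int))) 0).map
            (fun ki => (PySem.List.pyGetD ts (c0n : Int) 0 - ki.1, ki.2))
          = (t0, i) ::
            (PySem.List.enumerate (is.filter (fun j => PySem.List.pyGetD string j 0 == (c0n : Int))) 0).map
              (fun ki => (PySem.List.pyGetD ts' (c0n : Int) 0 - ki.1, ki.2)) := by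
      have hf : (PySem.List.pyGetD string i 0 == (c0n : Int)) = true := by
        rw [beq_iff_eq]; omega
      rw [List.filter_cons]
      simp only [hf, if_true]
      rw [PySem.List.enumerate_cons, List.map_cons]
      congr 1
      · rw [hc0cast, Prod.mk.injEq]
        exact ⟨by rw [← ht0def]; ring, rfl⟩
      · rw [show (0 : Int) + 1 = 0 + 1 from rfl, enum_shift, List.map_map]
        refine List.map_congr_left (fun ki _ => ?_)
        simp only [Function.comp_apply]
        rw [hts'get c0n hc0n_lt, if_pos hc0cast, hc0cast]
        rw [Prod.mk.injEq]
        exact ⟨by ring, rfl⟩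
    have hsplit : List.range m = List.range' 0 c0n ++ c0n :: List.range' (c0n + 1) (m - c0n - 1) := by
      have happ : List.range' 0 c0n ++ List.range' c0n (m - c0n) = List.range' 0 m := by
        have h := List.range'_append (s := 0) (m := c0n) (n := m - c0n) (step := 1)
        simpa [show c0n + (m - c0n) = m by omega] using h
      rw [List.range_eq_range', ← happ,
        show m - c0n = (m - c0n - 1) + 1 by omega, List.range'_succ]
      simp
    rw [hsplit, List.flatMap_append, List.flatMap_cons, hbucket_eq]
    have hA1 : (List.range' 0 c0n).flatMap (fun (c : Nat) =>
          (PySem.List.enumerate ((i :: is).filter (fun j => PySem.List.pyGetD string j 0 == (c : Int))) 0).map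
            (fun ki => (PySem.List.pyGetD ts (c : Int) 0 - ki.1, ki.2)))
        = (List.range' 0 c0n).flatMap (fun (c : Nat) =>
          (PySem.List.enumerate (is.filter (fun j => PySem.List.pyGetD string j 0 == (c : Int))) 0).map
            (fun ki => (PySem.List.pyGetD ts' (c : Int) 0 - ki.1, ki.2))) := by
      rw [List.flatMap_def, List.flatMap_def]
      refine congrArg List.flatten (List.map_congr_left (fun c hc => ?_))
      have hcb := List.mem_range'_1.mp hc
      exact hbucket_ne c (by omega) (by omega)
    have hA2 : (List.range' (c0n + 1) (m - c0n - 1)).flatMap (fun (c : Nat) =>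
          (PySem.List.enumerate ((i :: is).filter (fun j => PySem.List.pyGetD string j 0 == (c : Int))) 0).map
            (fun ki => (PySem.List.pyGetD ts (c : Int) 0 - ki.1, ki.2)))
        = (List.range' (c0n + 1) (m - c0n - 1)).flatMap (fun (c : Nat) =>
          (PySem.List.enumerate (is.filter (fun j => PySem.List.pyGetD string j 0 == (c : Int))) 0).map
            (fun ki => (PySem.List.pyGetD ts' (c : Int) 0 - ki.1, ki.2))) := by
      rw [List.flatMap_def, List.flatMap_def]
      refine congrArg List.flatten (List.map_congr_left (fun c hc => ?_))
      have hcb := List.mem_range'_1.mp hc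
      exact hbucket_ne c (by omega) (by omega)
    rw [hA1, hA2, List.cons_append]
    refine List.Perm.trans ?_ List.perm_middle.symm
    refine List.Perm.cons _ (IH.trans ?_)
    rw [hsplit, List.flatMap_append, List.flatMap_cons]

lemma sum_take_nonneg (bs : List Int) (h : ∀ b ∈ bs, 0 ≤ b) (k : Nat) :
    0 ≤ (bs.take k).sum := by
  refine List.sum_nonneg ?_
  intro b hb; exact h b (List.mem_of_mem_take hb)

lemma sum_take_mono (bs : List Int) (h : ∀ b ∈ bs, 0 ≤ b) {a b : Nat} (hab : a ≤ b) :
    (bs.take a).sum ≤ (bs.take b).sum := by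
  have hsp : bs.take b = bs.take a ++ (bs.drop a).take (b - a) := by
    rw [show b = a + (b - a) by omega, List.take_add]
    simp
  rw [hsp, List.sum_append]
  have h2 : 0 ≤ ((bs.drop a).take (b - a)).sum := by
    refine List.sum_nonneg ?_
    intro x hx
    exact h x (List.mem_of_mem_drop (List.mem_of_mem_take hx))
  omega

lemma length_pvGroup (string typemap : List Int) (c : Int) :
    (pvGroup string typemap c).length = pvCnt string typemap c := by
  rw [pvGroup, pvCnt, List.countP_eq_length_filter]

lemma bucket_mem {string bucketSizes typemap : List Int} {c : Nat} {x : Int × Int}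
    (hx : x ∈ (PySem.List.enumerate (pvGroup string typemap (c : Int)) 0).map
      (fun ki => (pvTail bucketSizes c - ki.1, ki.2))) :
    ∃ k : Int, 0 ≤ k ∧ k < (pvCnt string typemap (c : Int) : Int) ∧ x.1 = pvTail bucketSizes c - k := by
  rcases List.mem_map.mp hx with ⟨ki, hki, rfl⟩
  have h := mem_enum hki
  refine ⟨ki.1, h.1, ?_, rfl⟩
  have hl := h.2
  rw [length_pvGroup] at hl
  exact_mod_cast hl

lemma pvW_mem (string bucketSizes typemap : List Int) {x : Int × Int}
    (hx : x ∈ pvW string bucketSizes typemap) :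
    ∃ c : Nat, c < bucketSizes.length ∧ ∃ k : Int, 0 ≤ k ∧ k < (pvCnt string typemap (c : Int) : Int) ∧
      x.1 = pvTail bucketSizes c - k := by
  rw [pvW] at hx
  rcases List.mem_flatMap.mp hx with ⟨c, hc, hxc⟩
  exact ⟨c, List.mem_range.mp hc, bucket_mem hxc⟩

lemma pvW_fst_nonneg (string bucketSizes typemap : List Int)
    (h2 : ∀ b ∈ bucketSizes, 0 ≤ b)
    (h4 : ∀ c : Nat, c ∈ List.range bucketSizes.length →
      (pvCnt string typemap (c : Int) : Int) ≤ bucketSizes.getD c 0 ∧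
      (0 < pvCnt string typemap c → pvTail bucketSizes c < (string.length : Int))) :
    ∀ x ∈ pvW string bucketSizes typemap, 0 ≤ x.1 := by
  intro x hx
  obtain ⟨c, hc, k, hk0, hkc, hx1⟩ := pvW_mem _ _ _ hx
  have hcnt := (h4 c (List.mem_range.mpr hc)).1
  have hsum := sum_take_succ bucketSizes c hc
  have h0 : 0 ≤ (bucketSizes.take c).sum := sum_take_nonneg _ h2 c
  rw [hx1, pvTail]
  omega

lemma pvW_fst_pairwise_ne (string bucketSizes typemap : List Int)
    (h2 : ∀ b ∈ bucketSizes, 0 ≤ b)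
    (h4 : ∀ c : Nat, c ∈ List.range bucketSizes.length →
      (pvCnt string typemap (c : Int) : Int) ≤ bucketSizes.getD c 0 ∧
      (0 < pvCnt string typemap c → pvTail bucketSizes c < (string.length : Int))) :
    (pvW string bucketSizes typemap).Pairwise (fun x y => x.1 ≠ y.1) := by
  rw [pvW, List.pairwise_flatMap]
  constructor
  · intro c _
    rw [List.pairwise_map]
    refine (pairwise_enum_fst_lt _ 0).imp ?_
    intro a b hab
    simp only
    omega
  · refine List.Pairwise.imp_of_mem ?_ List.pairwise_lt_range
    intro c1 c2 hc1 hc2 hlt x hx y hy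
    have hc1m := List.mem_range.mp hc1
    have hc2m := List.mem_range.mp hc2
    obtain ⟨k1, hk10, hk1c, hx1⟩ := bucket_mem hx
    obtain ⟨k2, hk20, hk2c, hy1⟩ := bucket_mem hy
    have hcnt2 := (h4 c2 hc2).1
    have hsum2 := sum_take_succ bucketSizes c2 hc2m
    have hmono := sum_take_mono bucketSizes h2 (show c1 + 1 ≤ c2 by omega)
    rw [hx1, hy1, pvTail, pvTail]
    omega

lemma A_writes_perm_W (string bucketSizes typemap : List Int)
    (h3 : ∀ i ∈ pvLMS string typemap,
      0 ≤ PySem.List.pyGetD string i 0 ∧ PySem.List.pyGetD string i 0 < (bucketSizes.length : Int)) :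
    (pvWrites string (pvLMS string typemap) (findBucketTails bucketSizes)).Perm
      (pvW string bucketSizes typemap) := by
  have hlen : bucketSizes.length ≤ (findBucketTails bucketSizes).length := by
    rw [fbt_eq]; simp
  have hperm := writes_perm string (pvLMS string typemap) (findBucketTails bucketSizes)
    bucketSizes.length hlen h3
  refine hperm.trans ?_
  have heq : ((List.range bucketSizes.length).flatMap (fun (c : Nat) =>
      (PySem.List.enumerate ((pvLMS string typemap).filter
        (fun i => PySem.List.pyGetD string i 0 == (c : Int))) 0).map
        (fun ki => (PySem.List.pyGetD (findBucketTails bucketSizes) (c : Int) 0 - ki.1, ki.2))))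
      = pvW string bucketSizes typemap := by
    rw [pvW, List.flatMap_def, List.flatMap_def]
    refine congrArg List.flatten (List.map_congr_left (fun c hc => ?_))
    rw [getD_fbt _ _ (List.mem_range.mp hc)]
    rfl
  rw [heq]

lemma pvOp_comm {x y : Int × Int} (hx : 0 ≤ x.1) (hy : 0 ≤ y.1) (hne : x.1 ≠ y.1) (z : List Int) :
    pvOp (pvOp z x) y = pvOp (pvOp z y) x := by
  unfold pvOp
  rw [PySem.List.pySetD_of_nonneg _ _ hx, PySem.List.pySetD_of_nonneg _ _ hy,
    PySem.List.pySetD_of_nonneg _ _ hy, PySem.List.pySetD_of_nonneg _ _ hx]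
  exact List.set_comm _ _ (by omega)

lemma lms_empty_case (string bucketSizes typemap : List Int)
    (h : pvLMS string typemap = []) :
    guessLMSSort string bucketSizes typemap = guessLMSSort_alt string bucketSizes typemap := by
  rw [A_eq_writes, B_eq_W, h]
  simp [pvWrites, pvW, pvGroup, h, List.flatMap_def]

-- ===== VERDICT (by name: the statement is the Claim_ definition above) =====
theorem guessLMSSort_spec : Claim_equal_guessLMSSort := by
  intro string bucketSizes typemap _hdom hpre
  unfold Spec_guessLMSSort
  obtain ⟨_h1, hrest⟩ := hpre
  rcases hrest with hemp | ⟨h2, h3, h4⟩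
  · exact lms_empty_case string bucketSizes typemap hemp
  · rw [A_eq_writes, B_eq_W]
    refine List.Perm.foldl_eq' (A_writes_perm_W string bucketSizes typemap h3) ?_ _
    intro x hx y hy z
    have hperm := A_writes_perm_W string bucketSizes typemap h3
    have hxW : x ∈ pvW string bucketSizes typemap := hperm.mem_iff.mp hx
    have hyW : y ∈ pvW string bucketSizes typemap := hperm.mem_iff.mp hy
    by_cases hxy : x = y
    · subst hxy; rfl
    · exact pvOp_comm (pvW_fst_nonneg _ _ _ h2 h4 x hxW) (pvW_fst_nonneg _ _ _ h2 h4 y hyW)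
        ((pvW_fst_pairwise_ne _ _ _ h2 h4).forall (fun _ _ h => Ne.symm h) hxW hyW hxy) z
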